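-- pv_equiv track=rewrite | github.com/ThomasBainbridge/bearing-condition-monitor | src/bcmonitor/data_loader.py | _find_signal_key
-- ===== SOURCE A (Python) =====
-- from typing import Any
--
-- def _find_signal_key(mat_dict: dict[str, Any]) -> str:
--     """
--     Find the drive-end time-series key in a CWRU .mat file.
--
--     Typical examples:
--     X097_DE_time
--     X105_DE_time
--     """
--     candidate_keys = []
--
--     for key in mat_dict.keys():
--         if key.startswith("__"):
--             continue
--         if "DE" in key and "time" in key:
--             candidate_keys.append(key)
--
--     if not candidate_keys:
--         raise KeyError("Could not find a drive-end time-series key containing 'DE' and 'time'.")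
--
--     # Prefer the shortest valid key in case there are several
--     candidate_keys.sort(key=len)
--     return candidate_keys[0]
-- ===== SOURCE B (Python) =====
-- def _find_signal_key(mat_dict):
--     """Single pass over the keys keeping a running shortest matching key."""
--     best = None
--     for key in mat_dict.keys():
--         if key.startswith("__"):
--             continue
--         if "DE" in key and "time" in key:
--             if best is None or len(key) < len(best):
--                 best = key
--     if best is None:
--         raise KeyError("Could not find a drive-end time-series key containing 'DE' and 'time'.")
--     return best
-- ===== Notes on version B (the rewrite author's own statement) =====
-- stated objective: simpler
-- what changed: B replaces A's collect-all-candidates list plus a stable sort by length with a single pass over the keys that keeps a running shortest matching key (strict '<' preserves A's first-shortest tie-break).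
import Mathlib
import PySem

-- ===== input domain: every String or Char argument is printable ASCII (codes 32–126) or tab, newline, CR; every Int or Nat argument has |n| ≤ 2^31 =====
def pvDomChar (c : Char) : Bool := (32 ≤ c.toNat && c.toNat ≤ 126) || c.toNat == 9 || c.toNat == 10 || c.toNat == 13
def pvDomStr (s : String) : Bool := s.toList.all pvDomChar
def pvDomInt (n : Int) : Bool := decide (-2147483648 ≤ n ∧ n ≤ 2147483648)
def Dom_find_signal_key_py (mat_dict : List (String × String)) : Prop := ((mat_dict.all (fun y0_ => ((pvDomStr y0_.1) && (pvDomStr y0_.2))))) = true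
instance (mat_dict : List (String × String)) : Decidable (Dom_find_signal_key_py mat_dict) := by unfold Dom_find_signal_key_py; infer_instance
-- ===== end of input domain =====

-- B fuses A's filter-then-stable-sort-by-length into one pass keeping a running shortest
-- matching key; equivalence of the returned key is proved on all inputs where A returns.

-- ===== PORT A =====
-- A: collect matching keys, sort them (stably) by length, return the first.
def find_signal_key_py (mat_dict : List (String × String)) : String :=
  let candidate_keys : List String :=
    mat_dict.foldl (fun acc kv =>
      if PySem.Str.startswith kv.1 "__" then acc
      else if PySem.Str.isIn "DE" kv.1 && PySem.Str.isIn "time" kv.1 then acc ++ [kv.1]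
      else acc) []
  -- empty candidate list: Python raises KeyError (excluded by Pre_); candidate_keys[0] otherwise
  ((PySem.List.sorted candidate_keys (fun k => PySem.Str.len k)).head?).getD ""

-- ===== PORT B =====
-- B: one pass keeping the running shortest matching key.
def find_signal_key_py_alt (mat_dict : List (String × String)) : String :=
  let best : Option String :=
    mat_dict.foldl (fun best kv =>
      if PySem.Str.startswith kv.1 "__" then best
      else if PySem.Str.isIn "DE" kv.1 && PySem.Str.isIn "time" kv.1 then
        (match best with
         | none => some kv.1
         | some b => if PySem.Str.len kv.1 < PySem.Str.len b then some kv.1 else some b)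
      else best) none
  -- best = none: Python raises KeyError (excluded by Pre_)
  best.getD ""

-- ===== PRECONDITION & SPEC =====
-- Pre_ excludes exactly the inputs with no matching key, where the Python A raises KeyError.
def Pre_find_signal_key_py (mat_dict : List (String × String)) : Prop :=
  (mat_dict.any (fun kv =>
    !PySem.Str.startswith kv.1 "__" &&
    (PySem.Str.isIn "DE" kv.1 && PySem.Str.isIn "time" kv.1))) = true
instance (mat_dict : List (String × String)) : Decidable (Pre_find_signal_key_py mat_dict) := by
  unfold Pre_find_signal_key_py; infer_instance
def pvWitness_find_signal_key_py : (List (String × String)) := [("X097_DE_time", "v")]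

def Spec_find_signal_key_py (mat_dict : List (String × String)) (out : String) : Prop := out = find_signal_key_py_alt mat_dict
instance (mat_dict : List (String × String)) (out : String) : Decidable (Spec_find_signal_key_py mat_dict out) := by unfold Spec_find_signal_key_py; infer_instance

-- ===== CLAIM (what is proved, stated in full; the proofs are below) =====
def Claim_equal_find_signal_key_py : Prop := ∀ (mat_dict : List (String × String)), Dom_find_signal_key_py mat_dict → Pre_find_signal_key_py mat_dict → Spec_find_signal_key_py mat_dict (find_signal_key_py mat_dict)

-- ===== LEMMAS AND PROOFS =====

-- the shared match-test on a dict entry (proof-side helper)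
def pvPred (kv : String × String) : Bool :=
  !PySem.Str.startswith kv.1 "__" && (PySem.Str.isIn "DE" kv.1 && PySem.Str.isIn "time" kv.1)

-- B's per-key accumulator update (the body of B's loop on a matching key)
def pvBest (best : Option String) (k : String) : Option String :=
  match best with
  | none => some k
  | some b => if PySem.Str.len k < PySem.Str.len b then some k else some b

theorem pvBest_isSome (b : Option String) (x : String) :
    some ((pvBest b x).getD x) = pvBest b x := by
  cases b with
  | none => rfl
  | some c =>
    simp only [pvBest]
    split <;> rfl

-- branch-fused form of A's loop body
theorem pvStepA (acc : List String) (kv : String × String) :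
    (if PySem.Str.startswith kv.1 "__" then acc
     else if PySem.Str.isIn "DE" kv.1 && PySem.Str.isIn "time" kv.1 then acc ++ [kv.1]
     else acc) = if pvPred kv then acc ++ [kv.1] else acc := by
  by_cases hp : pvPred kv = true
  · have hp' := hp
    simp only [pvPred, Bool.and_eq_true, Bool.not_eq_true'] at hp'
    obtain ⟨ha, hb⟩ := hp'
    rw [if_pos hp]
    simp only [ha, hb]
    simp
  · rw [if_neg hp]
    by_cases ha : PySem.Str.startswith kv.1 "__" = true
    · simp only [ha]
      simp
    · have ha' : PySem.Str.startswith kv.1 "__" = false := by simpa using ha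
      have hb : (PySem.Str.isIn "DE" kv.1 && PySem.Str.isIn "time" kv.1) = false := by
        cases hcc : (PySem.Str.isIn "DE" kv.1 && PySem.Str.isIn "time" kv.1)
        · rfl
        · exact absurd (by unfold pvPred; rw [ha', hcc]; rfl) hp
      simp only [ha', hb]
      simp

-- branch-fused form of B's loop body
theorem pvStepB (b : Option String) (kv : String × String) :
    (if PySem.Str.startswith kv.1 "__" then b
     else if PySem.Str.isIn "DE" kv.1 && PySem.Str.isIn "time" kv.1 then
       (match b with
        | none => some kv.1
        | some c => if PySem.Str.len kv.1 < PySem.Str.len c then some kv.1 else some c)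
     else b) = if pvPred kv then pvBest b kv.1 else b := by
  by_cases hp : pvPred kv = true
  · have hp' := hp
    simp only [pvPred, Bool.and_eq_true, Bool.not_eq_true'] at hp'
    obtain ⟨ha, hb⟩ := hp'
    rw [if_pos hp]
    simp only [ha, hb]
    simp [pvBest]
  · rw [if_neg hp]
    by_cases ha : PySem.Str.startswith kv.1 "__" = true
    · simp only [ha]
      simp
    · have ha' : PySem.Str.startswith kv.1 "__" = false := by simpa using ha
      have hb : (PySem.Str.isIn "DE" kv.1 && PySem.Str.isIn "time" kv.1) = false := by
        cases hcc : (PySem.Str.isIn "DE" kv.1 && PySem.Str.isIn "time" kv.1)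
        · rfl
        · exact absurd (by unfold pvPred; rw [ha', hcc]; rfl) hp
      simp only [ha', hb]
      simp

-- A's candidate-collection loop is filter-then-project
theorem pvA_fold (l : List (String × String)) (acc : List String) :
    l.foldl (fun acc kv =>
      if PySem.Str.startswith kv.1 "__" then acc
      else if PySem.Str.isIn "DE" kv.1 && PySem.Str.isIn "time" kv.1 then acc ++ [kv.1]
      else acc) acc = acc ++ (l.filter pvPred).map (·.1) := by
  induction l generalizing acc with
  | nil => simp
  | cons kv t ih =>
    simp only [List.foldl_cons, List.filter_cons]
    rw [pvStepA]
    by_cases hp : pvPred kv = true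
    · rw [if_pos hp, if_pos hp, List.map_cons, ih]
      simp
    · rw [if_neg hp, if_neg hp]
      exact ih acc

-- B's loop is the running-best fold over the same filtered projection
theorem pvB_fold (l : List (String × String)) (b : Option String) :
    l.foldl (fun best kv =>
      if PySem.Str.startswith kv.1 "__" then best
      else if PySem.Str.isIn "DE" kv.1 && PySem.Str.isIn "time" kv.1 then
        (match best with
         | none => some kv.1
         | some c => if PySem.Str.len kv.1 < PySem.Str.len c then some kv.1 else some c)
      else best) b = ((l.filter pvPred).map (·.1)).foldl pvBest b := by
  induction l generalizing b with
  | nil => simp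
  | cons kv t ih =>
    simp only [List.foldl_cons, List.filter_cons]
    rw [pvStepB]
    by_cases hp : pvPred kv = true
    · rw [if_pos hp, if_pos hp, List.map_cons, List.foldl_cons]
      exact ih _
    · rw [if_neg hp, if_neg hp]
      exact ih b

-- head of inserting x into s (insertion-sort step) is exactly B's running-best update
theorem pvHead_insertBy (x : String) (s : List String) :
    (PySem.List.insertBy (fun a b => decide (PySem.Str.len a < PySem.Str.len b)) x s).head?
      = some ((pvBest s.head? x).getD x) := by
  cases s with
  | nil => rfl
  | cons h t =>
    simp only [PySem.List.insertBy, List.head?_cons, pvBest]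
    split
    · rename_i hx
      have hx' : x.length < h.length := by simpa using hx
      simp [hx']
    · rename_i hx
      have hx' : ¬ x.length < h.length := by simpa using hx
      simp [hx']

-- head of the insertion-sort fold over any list = B's running-best fold
theorem pvHead_foldl_insertBy (l : List String) (s : List String) :
    (l.foldl (fun acc x =>
        PySem.List.insertBy (fun a b => decide (PySem.Str.len a < PySem.Str.len b)) x acc) s).head?
      = l.foldl pvBest s.head? := by
  induction l generalizing s with
  | nil => rfl
  | cons x xs ih =>
    simp only [List.foldl_cons]
    rw [ih, pvHead_insertBy, pvBest_isSome]

-- first element of the stable sort by length = B's running-best over the same list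
theorem pvHead_sorted (l : List String) :
    (PySem.List.sorted l (fun k => PySem.Str.len k)).head? = l.foldl pvBest none := by
  rw [PySem.List.sorted_eq_foldl_insertBy, pvHead_foldl_insertBy]
  rfl

-- ===== VERDICT (by name: the statement is the Claim_ definition above) =====
theorem find_signal_key_py_spec : Claim_equal_find_signal_key_py := by
  intro mat_dict _ _
  unfold Spec_find_signal_key_py find_signal_key_py find_signal_key_py_alt
  rw [pvA_fold, pvB_fold]
  simp only [List.nil_append, pvHead_sorted]
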